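-- pv_equiv track=rewrite | github.com/sbrommer/everybody-codes | 2024/02/main.py | find
-- ===== SOURCE A (Python) =====
-- def find(text, words, symbols=False, wrap=False):
--     ix = set()
--
--     for word in words:
--         for r, line in enumerate(text):
--             l = len(line)
--             for c in range(l):
--                 line_ = (line * (wrap + 1))[c:]
--                 if line_.startswith(word):
--                     ix |= {(r, (c+dc)%l)
--                            for dc in range(1 if not symbols else len(word))}
--
--     return ix
-- ===== SOURCE B (Python) =====
-- def find(text, words, symbols=False, wrap=False):
--     ix = set()
--     if not words:
--         return ix
--     maxk = max(len(w) for w in words)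
--     # per row: index every start column by each substring (length <= maxk) of the doubled line
--     tables = []
--     for line in text:
--         s = line + line if wrap else line
--         l = len(line)
--         sub = {}
--         for c in range(l):
--             top = min(maxk, len(s) - c)
--             for m in range(0, top + 1):
--                 sub.setdefault(s[c:c+m], []).append(c)
--         tables.append(sub)
--     for word in words:
--         span = len(word) if symbols else 1
--         for r, line in enumerate(text):
--             l = len(line)
--             for c in tables[r].get(word, []):
--                 for dc in range(span):
--                     ix.add((r, (c + dc) % l))
--     return ix
-- ===== Notes on version B (the rewrite author's own statement) =====
-- stated objective: faster
-- what changed: B builds, once per row, a dictionary mapping every substring (up to the maximum word length) of the possibly doubled line to its list of start columns, so each word's match columns per row become a single dict lookup instead of slicing the doubled line at every column and calling startswith per word.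
import Mathlib
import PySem

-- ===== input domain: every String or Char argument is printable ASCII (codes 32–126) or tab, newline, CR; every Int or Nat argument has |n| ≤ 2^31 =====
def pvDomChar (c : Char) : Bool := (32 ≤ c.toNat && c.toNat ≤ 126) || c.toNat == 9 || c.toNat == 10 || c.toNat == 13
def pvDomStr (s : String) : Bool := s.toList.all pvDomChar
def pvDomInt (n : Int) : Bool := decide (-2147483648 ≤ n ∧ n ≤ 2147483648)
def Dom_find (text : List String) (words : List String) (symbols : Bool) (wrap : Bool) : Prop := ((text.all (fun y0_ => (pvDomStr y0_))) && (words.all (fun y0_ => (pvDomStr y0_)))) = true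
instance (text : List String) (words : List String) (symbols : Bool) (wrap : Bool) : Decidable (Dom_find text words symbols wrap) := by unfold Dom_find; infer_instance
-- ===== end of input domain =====

-- B replaces A's per-column slice-and-startswith scan by a per-row dictionary from every
-- substring (up to the maximum word length) of the possibly doubled line to its start columns,
-- making each word's per-row match list a single dict lookup; equal return value proved.

-- ===== PORT A =====
-- literal port of A; line * (wrap + 1) is ported as flatten of (wrap.toNat+1) replicas (exact for a
-- nonnegative multiplier); the set-comprehension union is PySem.Set.union with the dc list in order.
def find (text : List String) (words : List String) (symbols : Bool) (wrap : Bool) : List (Int × Int) :=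
  words.foldl (fun ix word =>
    (PySem.List.enumerate text).foldl (fun ix rl =>
      let r : Int := rl.1
      let line : List Char := rl.2.toList
      let l : Int := (line.length : Int)
      (PySem.List.pyRange 0 l 1).foldl (fun ix c =>
        let line_ : List Char := PySem.List.slice ((List.replicate (wrap.toNat + 1) line).flatten) (some c) none
        if PySem.Chars.startswith line_ word.toList then
          PySem.Set.union ix ((PySem.List.pyRange 0 (if !symbols then 1 else (word.toList.length : Int)) 1).map
            (fun dc => (r, PySem.Int.mod (c + dc) l)))
        else ix) ix) ix) []

-- ===== PORT B =====
-- the per-row substring table of Source B: setdefault(...).append(c) is Dict.modify with default []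
def subIndex (maxk : Int) (line : List Char) (wrap : Bool) : PySem.Dict (List Char) (List Int) :=
  let s : List Char := if wrap then line ++ line else line
  (PySem.List.pyRange 0 (line.length : Int) 1).foldl (fun sub c =>
    let top : Int := min maxk ((s.length : Int) - c)
    (PySem.List.pyRange 0 (top + 1) 1).foldl (fun sub m =>
      sub.modify (PySem.List.slice s (some c) (some (c + m))) [] (fun cs => cs ++ [c])) sub)
    PySem.Dict.empty

def find_alt (text : List String) (words : List String) (symbols : Bool) (wrap : Bool) : List (Int × Int) :=
  if words = [] then [] else
  let maxk : Int := (PySem.List.max? (words.map (fun w => (w.toList.length : Int))) (fun x => x)).getD 0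
  let tables := text.map (fun line => subIndex maxk line.toList wrap)
  words.foldl (fun ix word =>
    let span : Int := if symbols then (word.toList.length : Int) else 1
    (PySem.List.enumerate text).foldl (fun ix rl =>
      let r : Int := rl.1
      let line : List Char := rl.2.toList
      let l : Int := (line.length : Int)
      ((PySem.List.pyGetD tables r PySem.Dict.empty).getD word.toList []).foldl
        (fun ix c =>
          (PySem.List.pyRange 0 span 1).foldl
            (fun ix dc => PySem.Set.add ix (r, PySem.Int.mod (c + dc) l)) ix) ix) ix) []

-- ===== PRECONDITION & SPEC =====
def Spec_find (text : List String) (words : List String) (symbols : Bool) (wrap : Bool) (out : List (Int × Int)) : Prop := out = find_alt text words symbols wrap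
instance (text : List String) (words : List String) (symbols : Bool) (wrap : Bool) (out : List (Int × Int)) : Decidable (Spec_find text words symbols wrap out) := by unfold Spec_find; infer_instance

-- ===== CLAIM (what is proved, stated in full; the proofs are below) =====
def Claim_equal_find : Prop := ∀ (text : List String) (words : List String) (symbols : Bool) (wrap : Bool), Dom_find text words symbols wrap → Spec_find text words symbols wrap (find text words symbols wrap)

-- ===== LEMMAS AND PROOFS =====

-- the per-match-column action shared (provably) by both inner loops
def pvG (r l span : Int) (ix : PySem.Set (Int × Int)) (c : Nat) : PySem.Set (Int × Int) :=
  (PySem.List.pyRange 0 span 1).foldl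
    (fun ix dc => PySem.Set.add ix (r, PySem.Int.mod ((c : Int) + dc) l)) ix

lemma pyRange_zero_one (n : Nat) :
    PySem.List.pyRange 0 (n : Int) 1 = List.map (fun (k : Nat) => (k : Int)) (List.range n) := by
  rw [PySem.List.pyRange_of_pos 0 n (by omega)]
  by_cases h : (0 : Int) < (n : Int)
  · have h2 : (((n : Int) - 0 + 1 - 1) / 1).toNat = n := by simp
    rw [if_pos h, h2]
    simp only [zero_add, one_mul]
  · have : n = 0 := by omega
    subst this; simp

lemma repl_flatten (line : List Char) (wrap : Bool) :
    (List.replicate (wrap.toNat + 1) line).flatten = if wrap then line ++ line else line := by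
  cases wrap <;> simp

-- one column's inner loop: it appends c0 to exactly the keys that are prefixes of s from c0
-- (the length cap t ≤ s.length - c0 + 1 makes key length determine m, so at most one hit per key)
lemma subIndex_inner (s : List Char) (c0 : Nat) (_hc : c0 ≤ s.length) :
    ∀ (t : Nat), t ≤ s.length - c0 + 1 →
      ∀ (d : PySem.Dict (List Char) (List Int)) (w : List Char),
      ((PySem.List.pyRange 0 (t : Int) 1).foldl
          (fun sub m =>
            sub.modify (PySem.List.slice s (some (c0 : Int)) (some ((c0 : Int) + m))) []
              (fun cs => cs ++ [(c0 : Int)])) d).getD w []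
        = d.getD w [] ++ (if w.length < t ∧ w <+: s.drop c0 then [(c0 : Int)] else []) := by
  intro t
  induction t with
  | zero => intro _ d w; simp
  | succ t ih =>
    intro ht d w
    have hcast : ((t + 1 : Nat) : Int) = (t : Int) + 1 := by push_cast; ring
    rw [hcast, PySem.List.pyRange_one_succ_right (by positivity), List.foldl_append,
      List.foldl_cons, List.foldl_nil]
    have hkey : PySem.List.slice s (some (c0 : Int)) (some ((c0 : Int) + (t : Int)))
        = (s.drop c0).take t := PySem.List.slice_natCast_add s c0 t
    have htlen : t ≤ s.length - c0 := by omega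
    have hklen : ((s.drop c0).take t).length = t := by
      simp [List.length_take, List.length_drop]; omega
    rw [PySem.Dict.getD_modify, hkey]
    by_cases hwk : w = (s.drop c0).take t
    · have hwl : w.length = t := by rw [hwk]; exact hklen
      have hpre : w <+: s.drop c0 := by rw [hwk]; exact List.take_prefix t (s.drop c0)
      rw [if_pos hwk, ← hwk, ih (by omega) d w]
      rw [if_neg (by omega), if_pos ⟨by omega, hpre⟩]
      simp
    · rw [if_neg hwk, ih (by omega) d w]
      congr 1
      by_cases hpre : w <+: s.drop c0
      · have hne : w.length ≠ t := by
          intro hl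
          exact hwk (by rw [← hl]; exact List.prefix_iff_eq_take.mp hpre)
        by_cases hlt : w.length < t
        · rw [if_pos ⟨hlt, hpre⟩, if_pos ⟨by omega, hpre⟩]
        · rw [if_neg (by rintro ⟨h1, _⟩; omega), if_neg (by rintro ⟨h1, _⟩; omega)]
      · simp [hpre]

-- what subIndex stores for a key no longer than maxk: its match columns, in increasing order
lemma subIndex_aux (maxk : Int) (line : List Char) (wrap : Bool) (w : List Char)
    (hw : (w.length : Int) ≤ maxk) :
    ∀ (cN : Nat), cN ≤ line.length →
      ∀ (d : PySem.Dict (List Char) (List Int)),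
      ((PySem.List.pyRange 0 (cN : Int) 1).foldl (fun sub c =>
          (PySem.List.pyRange 0
              (min maxk (((if wrap then line ++ line else line).length : Int) - c) + 1) 1).foldl (fun sub m =>
            sub.modify (PySem.List.slice (if wrap then line ++ line else line) (some c) (some (c + m))) []
              (fun cs => cs ++ [c])) sub) d).getD w []
        = d.getD w []
          ++ ((List.range cN).filter
              (fun c => PySem.Chars.startswith ((if wrap then line ++ line else line).drop c) w)).map
              (fun (c : Nat) => (c : Int)) := by
  intro cN
  induction cN with
  | zero => intro _ d; simp
  | succ cN ih =>
    intro hcN d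
    set s : List Char := if wrap then line ++ line else line with hs
    have hls : line.length ≤ s.length := by rw [hs]; cases wrap <;> simp
    have hcs : cN ≤ s.length := by omega
    have hcast : ((cN + 1 : Nat) : Int) = (cN : Int) + 1 := by push_cast; ring
    rw [hcast, PySem.List.pyRange_one_succ_right (by positivity), List.foldl_append,
      List.foldl_cons, List.foldl_nil]
    set top : Int := min maxk ((s.length : Int) - (cN : Int)) with htop
    have htop0 : 0 ≤ top := by
      rw [htop]
      apply le_min (le_trans (by positivity) hw)
      omega
    have htcast : top + 1 = ((top.toNat + 1 : Nat) : Int) := by push_cast; omega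
    have htle : top.toNat + 1 ≤ s.length - cN + 1 := by
      have : top ≤ (s.length : Int) - (cN : Int) := min_le_right _ _
      omega
    rw [htcast, subIndex_inner s cN hcs (top.toNat + 1) htle _ w, ih (by omega) d]
    have hcond : (w.length < top.toNat + 1 ∧ w <+: s.drop cN)
        ↔ PySem.Chars.startswith (s.drop cN) w = true := by
      rw [PySem.Chars.startswith_iff]
      constructor
      · exact fun h => h.2
      · intro hp
        refine ⟨?_, hp⟩
        have hlen : w.length ≤ s.length - cN := by
          have := hp.length_le
          simp only [List.length_drop] at this
          omega
        have : (w.length : Int) ≤ top := by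
          rw [htop]
          exact le_min hw (by omega)
        omega
    rw [List.range_succ, List.filter_append, List.map_append, List.append_assoc]
    congr 1
    rcases Bool.eq_false_or_eq_true (PySem.Chars.startswith (s.drop cN) w) with hb | hb
    · rw [if_pos (hcond.mpr hb)]
      simp [hb]
    · rw [if_neg (fun h => by rw [hcond.mp h] at hb; cases hb)]
      simp [hb]

lemma subIndex_getD (maxk : Int) (line : List Char) (wrap : Bool) (w : List Char)
    (hw : (w.length : Int) ≤ maxk) :
    (subIndex maxk line wrap).getD w []
      = ((List.range line.length).filter
          (fun c => PySem.Chars.startswith ((if wrap then line ++ line else line).drop c) w)).map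
          (fun (c : Nat) => (c : Int)) := by
  show ((PySem.List.pyRange 0 (line.length : Int) 1).foldl _ PySem.Dict.empty).getD w [] = _
  rw [subIndex_aux maxk line wrap w hw line.length le_rfl PySem.Dict.empty]
  simp [PySem.Dict.getD_empty]

-- the two per-word-per-row computations agree
lemma inner_eq (r : Int) (word line : List Char) (symbols wrap : Bool) (maxk : Int)
    (hw : (word.length : Int) ≤ maxk) (ix : PySem.Set (Int × Int)) :
    (PySem.List.pyRange 0 (line.length : Int) 1).foldl (fun ix c =>
        if PySem.Chars.startswith
            (PySem.List.slice ((List.replicate (wrap.toNat + 1) line).flatten) (some c) none) word then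
          PySem.Set.union ix ((PySem.List.pyRange 0 (if !symbols then 1 else (word.length : Int)) 1).map
            (fun dc => (r, PySem.Int.mod (c + dc) (line.length : Int))))
        else ix) ix
      = ((subIndex maxk line wrap).getD word []).foldl
          (fun ix c =>
            (PySem.List.pyRange 0 (if symbols then (word.length : Int) else 1) 1).foldl
              (fun ix dc => PySem.Set.add ix (r, PySem.Int.mod (c + dc) (line.length : Int))) ix) ix := by
  have hspan : (if !symbols then (1 : Int) else (word.length : Int))
      = (if symbols then (word.length : Int) else 1) := by cases symbols <;> rfl
  set s : List Char := if wrap then line ++ line else line with hs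
  rw [subIndex_getD maxk line wrap word hw, ← hs]
  rw [List.foldl_map]
  rw [List.foldl_filter]
  rw [pyRange_zero_one, List.foldl_map]
  apply List.foldl_ext
  intro a k _
  rw [repl_flatten, PySem.List.slice_from_natCast, ← hs, hspan]
  by_cases hP : PySem.Chars.startswith (s.drop k) word
  · rw [if_pos hP, if_pos hP]
    simp only [PySem.Set.union, PySem.Set.update, List.foldl_map]
  · rw [if_neg hP, if_neg hP]

theorem find_eq_alt (text words : List String) (symbols wrap : Bool) :
    find text words symbols wrap = find_alt text words symbols wrap := by
  rcases words with _ | ⟨w0, ws⟩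
  · simp [find, find_alt]
  · unfold find find_alt
    rw [if_neg (by simp)]
    set words : List String := w0 :: ws with hwords
    set maxk : Int :=
      (PySem.List.max? (words.map (fun w => (w.toList.length : Int))) (fun x => x)).getD 0 with hmaxk
    have hmax : ∀ w ∈ words, (w.toList.length : Int) ≤ maxk := by
      intro w hwmem
      rcases hm : PySem.List.max? (words.map (fun w => (w.toList.length : Int))) (fun x => x) with
        _ | m
      · exfalso
        have := (PySem.List.max?_eq_none_iff _ _).mp hm
        simp [hwords] at this
      · have := PySem.List.max?_isMax hm (w.toList.length : Int)
          (List.mem_map_of_mem hwmem)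
        rw [hmaxk, hm]
        simpa using this
    apply PySem.List.foldl_congr_mem'
    intro word hword ix
    apply PySem.List.foldl_congr_mem
    intro ix2 rl hrl
    rcases (PySem.List.mem_enumerate_iff _ _ _).mp hrl with ⟨k, hk, hrleq⟩
    subst hrleq
    simp only [zero_add]
    have hidx : PySem.List.pyGetD (text.map (fun line => subIndex maxk line.toList wrap))
        (k : Int) PySem.Dict.empty = subIndex maxk text[k].toList wrap := by
      rw [PySem.List.pyGetD_natCast]
      simp [List.getD_eq_getElem?_getD, hk]
    rw [hidx]
    have := inner_eq (k : Int) word.toList text[k].toList symbols wrap maxk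
      (hmax word hword) ix2
    simpa using this

-- ===== VERDICT (by name: the statement is the Claim_ definition above) =====
theorem find_spec : Claim_equal_find := by
  intro text words symbols wrap _
  unfold Spec_find
  exact find_eq_alt text words symbols wrap
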